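-- pv_equiv track=rewrite | github.com/JoshZastrow/rehearse | realtalk/compact.py | _extract_summary_timeline
-- ===== SOURCE A (Python) =====
-- def format_compact_summary(summary: str) -> str:
--     """Normalize a compaction summary into human-readable text."""
--     without_analysis = _strip_tag_block(summary, "analysis")
--     content = _extract_tag_block(without_analysis, "summary")
--     if content is not None:
--         formatted = without_analysis.replace(
--             f"<summary>{content}</summary>",
--             f"Summary:\n{content.strip()}",
--         )
--     else:
--         formatted = without_analysis
--     return _collapse_blank_lines(formatted).strip()
--
-- def _extract_tag_block(content: str, tag: str) -> str | None:
--     start = f"<{tag}>"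
--     end = f"</{tag}>"
--     s = content.find(start)
--     if s == -1:
--         return None
--     s += len(start)
--     e = content.find(end, s)
--     if e == -1:
--         return None
--     return content[s:e]
--
-- def _strip_tag_block(content: str, tag: str) -> str:
--     start = f"<{tag}>"
--     end = f"</{tag}>"
--     s = content.find(start)
--     e = content.find(end)
--     if s == -1 or e == -1:
--         return content
--     return content[:s] + content[e + len(end) :]
--
-- def _collapse_blank_lines(content: str) -> str:
--     result: list[str] = []
--     last_blank = False
--     for line in content.splitlines():
--         is_blank = not line.strip()
--         if is_blank and last_blank:
--             continue
--         result.append(line)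
--         last_blank = is_blank
--     return "\n".join(result)
--
-- def _extract_summary_timeline(summary: str) -> list[str]:
--     lines: list[str] = []
--     in_timeline = False
--     for line in format_compact_summary(summary).splitlines():
--         trimmed = line.rstrip()
--         if trimmed == "- Key timeline:":
--             in_timeline = True
--             continue
--         if not in_timeline:
--             continue
--         if not trimmed:
--             break
--         lines.append(trimmed)
--     return lines
-- ===== SOURCE B (Python) =====
-- import itertools
--
-- _MARKER = "- Key timeline:"
--
-- def _split_once(text, sep):
--     head, found, tail = text.partition(sep)
--     return (head, tail) if found else None
--
-- def _drop_block(text, tag):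
--     a = _split_once(text, f"<{tag}>")
--     b = _split_once(text, f"</{tag}>")
--     if a is None or b is None:
--         return text
--     return a[0] + b[1]
--
-- def _block_content(text, tag):
--     a = _split_once(text, f"<{tag}>")
--     if a is None:
--         return None
--     b = _split_once(a[1], f"</{tag}>")
--     return b[0] if b is not None else None
--
-- def _dedupe_blanks(lines):
--     if not lines:
--         return []
--     return [lines[0]] + [l for prev, l in zip(lines, lines[1:]) if l.strip() or prev.strip()]
--
-- def _format_summary_text(summary):
--     text = _drop_block(summary, "analysis")
--     content = _block_content(text, "summary")
--     if content is not None: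
--         text = text.replace(f"<summary>{content}</summary>", f"Summary:\n{content.strip()}")
--     return "\n".join(_dedupe_blanks(text.splitlines())).strip()
--
-- def _extract_summary_timeline(summary):
--     lines = [l.rstrip() for l in _format_summary_text(summary).splitlines()]
--     groups, cur = [], []
--     for l in lines:
--         if l == _MARKER:
--             groups.append(cur)
--             cur = []
--         else:
--             cur.append(l)
--     groups.append(cur)
--     tail = [l for g in groups[1:] for l in g]
--     return list(itertools.takewhile(bool, tail))
-- ===== Notes on version B (the rewrite author's own statement) =====
-- stated objective: alternative
-- what changed: Every stage is re-decomposed: tag blocks are split with str.partition instead of find/slice index arithmetic, consecutive blank lines are collapsed by a pairwise zip over adjacent lines instead of a last_blank flag loop, and the timeline is extracted by splitting the rstripped lines on the marker-header separator lines and taking the non-blank prefix of everything after the first separator, instead of A's stateful in_timeline scan.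
import Mathlib
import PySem

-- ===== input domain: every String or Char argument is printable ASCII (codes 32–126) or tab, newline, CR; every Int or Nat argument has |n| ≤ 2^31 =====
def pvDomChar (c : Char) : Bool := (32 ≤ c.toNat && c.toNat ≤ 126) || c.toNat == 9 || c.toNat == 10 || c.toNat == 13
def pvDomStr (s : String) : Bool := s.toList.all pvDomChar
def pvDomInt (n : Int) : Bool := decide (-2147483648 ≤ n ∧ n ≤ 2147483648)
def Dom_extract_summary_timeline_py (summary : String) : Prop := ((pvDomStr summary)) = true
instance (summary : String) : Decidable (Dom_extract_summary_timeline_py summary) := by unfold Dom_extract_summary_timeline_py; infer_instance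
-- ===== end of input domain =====

-- B restructures the whole pipeline: partition-based tag splitting, pairwise (zip) blank-line
-- dedup, and split-on-separator timeline extraction, instead of A's find-arithmetic and flag loops
-- (objective: alternative decomposition, same cost).

-- ===== PORT A =====
-- _strip_tag_block
def pvStripTagBlock (content : String) (tag : String) : String :=
  let start := "<" ++ tag ++ ">"
  let end_ := "</" ++ tag ++ ">"
  let s := PySem.Str.find content start
  let e := PySem.Str.find content end_
  if s = -1 ∨ e = -1 then content
  else PySem.Str.slice content none (some s) ++
       PySem.Str.slice content (some (e + PySem.Str.len end_)) none

-- _extract_tag_block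
def pvExtractTagBlock (content : String) (tag : String) : Option String :=
  let start := "<" ++ tag ++ ">"
  let end_ := "</" ++ tag ++ ">"
  let s := PySem.Str.find content start
  if s = -1 then none
  else
    let s := s + PySem.Str.len start
    let e := PySem.Str.findFrom content end_ s
    if e = -1 then none
    else some (PySem.Str.slice content (some s) (some e))

-- _collapse_blank_lines (loop over splitlines with last_blank flag)
def pvCollapseLoop : List String → Bool → List String
  | [], _ => []
  | line :: rest, lastBlank =>
    let isBlank := PySem.Str.strip line = ""
    if isBlank ∧ lastBlank then pvCollapseLoop rest lastBlank
    else line :: pvCollapseLoop rest isBlank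

def pvCollapseBlankLines (content : String) : String :=
  PySem.Str.join "\n" (pvCollapseLoop (PySem.Str.splitlines content) false)

-- format_compact_summary
def pvFormatCompactSummary (summary : String) : String :=
  let withoutAnalysis := pvStripTagBlock summary "analysis"
  let formatted :=
    match pvExtractTagBlock withoutAnalysis "summary" with
    | some content =>
        PySem.Str.replace withoutAnalysis
          ("<summary>" ++ content ++ "</summary>")
          ("Summary:\n" ++ PySem.Str.strip content)
    | none => withoutAnalysis
  PySem.Str.strip (pvCollapseBlankLines formatted)

-- A's loop: in_timeline flag, 'break' rendered as returning []
def pvALoop : List String → Bool → List String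
  | [], _ => []
  | line :: rest, inTimeline =>
    let trimmed := PySem.Str.rstrip line
    if trimmed = "- Key timeline:" then pvALoop rest true
    else if ¬ inTimeline then pvALoop rest inTimeline
    else if trimmed = "" then []
    else trimmed :: pvALoop rest inTimeline

def extract_summary_timeline_py (summary : String) : List String :=
  pvALoop (PySem.Str.splitlines (pvFormatCompactSummary summary)) false

-- ===== PORT B =====
-- _split_once: str.partition, returning (head, tail) or None; ported by hand via find/slice
-- (exact: partition splits at the FIRST occurrence, None iff the separator is absent)
def pvSplitOnce (text : String) (sep : String) : Option (String × String) :=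
  let i := PySem.Str.find text sep
  if i = -1 then none
  else some (PySem.Str.slice text none (some i),
             PySem.Str.slice text (some (i + PySem.Str.len sep)) none)

-- _drop_block
def pvDropBlock (text : String) (tag : String) : String :=
  match pvSplitOnce text ("<" ++ tag ++ ">"), pvSplitOnce text ("</" ++ tag ++ ">") with
  | some a, some b => a.1 ++ b.2
  | _, _ => text

-- _block_content
def pvBlockContent (text : String) (tag : String) : Option String :=
  match pvSplitOnce text ("<" ++ tag ++ ">") with
  | none => none
  | some a =>
    match pvSplitOnce a.2 ("</" ++ tag ++ ">") with
    | none => none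
    | some b => some b.1

-- _dedupe_blanks: keep the first line, then every line whose own strip or predecessor's strip is nonempty
def pvDedupeBlanks (lines : List String) : List String :=
  match lines with
  | [] => []
  | l0 :: rest =>
      l0 :: (((l0 :: rest).zip rest).filter
        (fun pl => !(PySem.Str.strip pl.2 == "") || !(PySem.Str.strip pl.1 == ""))).map Prod.snd

-- _format_summary_text
def pvFormatB (summary : String) : String :=
  let text := pvDropBlock summary "analysis"
  let text2 :=
    match pvBlockContent text "summary" with
    | some content =>
        PySem.Str.replace text
          ("<summary>" ++ content ++ "</summary>")
          ("Summary:\n" ++ PySem.Str.strip content)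
    | none => text
  PySem.Str.strip (PySem.Str.join "\n" (pvDedupeBlanks (PySem.Str.splitlines text2)))

-- the split-on-separator loop body (groups.append(cur) / cur.append(l))
def pvSplitStep (st : List (List String) × List String) (l : String) :
    List (List String) × List String :=
  if l == "- Key timeline:" then (st.1 ++ [st.2], []) else (st.1, st.2 ++ [l])

def extract_summary_timeline_py_alt (summary : String) : List String :=
  let lines := (PySem.Str.splitlines (pvFormatB summary)).map PySem.Str.rstrip
  let st := lines.foldl pvSplitStep ([], [])
  (((st.1 ++ [st.2]).drop 1).flatten).takeWhile (fun l => !(l == ""))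

-- ===== PRECONDITION & SPEC =====
def Spec_extract_summary_timeline_py (summary : String) (out : List String) : Prop := out = extract_summary_timeline_py_alt summary
instance (summary : String) (out : List String) : Decidable (Spec_extract_summary_timeline_py summary out) := by unfold Spec_extract_summary_timeline_py; infer_instance

-- ===== CLAIM (what is proved, stated in full; the proofs are below) =====
def Claim_equal_extract_summary_timeline_py : Prop := ∀ (summary : String), Dom_extract_summary_timeline_py summary → Spec_extract_summary_timeline_py summary (extract_summary_timeline_py summary)

-- ===== LEMMAS AND PROOFS =====

-- B's partition-based _drop_block computes A's _strip_tag_block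
theorem pvDropBlock_eq (text tag : String) : pvDropBlock text tag = pvStripTagBlock text tag := by
  unfold pvDropBlock pvStripTagBlock pvSplitOnce
  by_cases hs : PySem.Chars.find text.toList ('<' :: (tag.toList ++ ['>'])) = -1 <;>
    by_cases he : PySem.Chars.find text.toList ('<' :: '/' :: (tag.toList ++ ['>'])) = -1 <;>
      simp [hs, he]

-- B's partition-based _block_content computes A's _extract_tag_block
theorem splitOnce_neg (text sep : String) (h : PySem.Str.find text sep = -1) :
    pvSplitOnce text sep = none := by
  unfold pvSplitOnce; rw [if_pos h]

theorem splitOnce_pos (text sep : String) (h : ¬ PySem.Str.find text sep = -1) :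
    pvSplitOnce text sep = some (PySem.Str.slice text none (some (PySem.Str.find text sep)),
      PySem.Str.slice text (some (PySem.Str.find text sep + PySem.Str.len sep)) none) := by
  unfold pvSplitOnce; rw [if_neg h]

theorem pvBlockContent_eq (text tag : String) :
    pvBlockContent text tag = pvExtractTagBlock text tag := by
  simp only [pvBlockContent, pvExtractTagBlock]
  by_cases hs : PySem.Str.find text ("<" ++ tag ++ ">") = -1
  · simp only [splitOnce_neg _ _ hs, hs, if_true]
  · simp only [splitOnce_pos _ _ hs, hs, if_false]
    set s := PySem.Str.find text ("<" ++ tag ++ ">") with hsdef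
    have hs0 : 0 ≤ s := by
      have h1 := PySem.Chars.neg_one_le_find text.toList ("<" ++ tag ++ ">").toList
      rw [← PySem.Str.find_eq, ← hsdef] at h1
      rw [hsdef] at hs
      omega
    have hpre : ("<" ++ tag ++ ">").toList <+: text.toList.drop s.toNat := by
      have h := (PySem.Chars.find_spec (s := text.toList) (sub := ("<" ++ tag ++ ">").toList)
        (by rw [← PySem.Str.find_eq, ← hsdef]; exact hs0)).1
      rwa [← PySem.Str.find_eq, ← hsdef] at h
    set k' : Nat := s.toNat + ("<" ++ tag ++ ">").toList.length with hk'def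
    have hk2 : k' ≤ text.toList.length := by
      have h1 := hpre.length_le
      have h2 : s ≤ (text.toList.length : Int) := by
        rw [hsdef, PySem.Str.find_eq]; exact PySem.Chars.find_le_length _ _
      rw [List.length_drop] at h1
      omega
    have hk' : s + PySem.Str.len ("<" ++ tag ++ ">") = (k' : Int) := by
      rw [PySem.Str.len_eq]
      omega
    set tail := PySem.Str.slice text (some (s + PySem.Str.len ("<" ++ tag ++ ">"))) none with htaildef
    have htail : tail.toList = text.toList.drop k' := by
      rw [htaildef, hk', PySem.Str.toList_slice, PySem.Chars.slice_eq_listSlice,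
        PySem.List.slice_from _ (by positivity)]
      simp
    set j := PySem.Chars.find (text.toList.drop k') ("</" ++ tag ++ ">").toList with hjdef
    have hfind' : PySem.Str.find tail ("</" ++ tag ++ ">") = j := by
      rw [PySem.Str.find_eq, htail, hjdef]
    have hFF : PySem.Str.findFrom text ("</" ++ tag ++ ">") (s + PySem.Str.len ("<" ++ tag ++ ">")) =
        if j = -1 then -1 else (k' : Int) + j := by
      rw [hk', PySem.Str.findFrom_eq]
      exact PySem.Chars.findFrom_natCast text.toList ("</" ++ tag ++ ">").toList k' hk2
    by_cases hj : j = -1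
    · rw [splitOnce_neg _ _ (by rw [hfind']; exact hj), hFF, if_pos hj]
      simp
    · have hj0 : 0 ≤ j := by
        have h1 := PySem.Chars.neg_one_le_find (text.toList.drop k') ("</" ++ tag ++ ">").toList
        rw [← hjdef] at h1
        omega
      have hslice : PySem.Str.slice tail none (some j) =
          PySem.Str.slice text (some (s + PySem.Str.len ("<" ++ tag ++ ">"))) (some ((k' : Int) + j)) := by
        apply String.toList_inj.mp
        rw [PySem.Str.toList_slice, PySem.Chars.slice_eq_listSlice, htail,
          PySem.List.slice_to _ hj0]
        rw [PySem.Str.toList_slice, PySem.Chars.slice_eq_listSlice, hk',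
          show (k' : Int) + j = ((k' + j.toNat : Nat) : Int) from by omega,
          PySem.List.slice_natCast]
        congr 1
        omega
      rw [splitOnce_pos _ _ (by rw [hfind']; exact hj), hFF, if_neg hj,
        if_neg (show ¬((k' : Int) + j = -1) from by omega), hfind']
      show some (PySem.Str.slice tail none (some j)) = _
      exact congrArg some hslice

-- the pairwise-zip dedup step, with the previous line generalized
theorem dedupe_zip (ls : List String) (prev : String) :
    pvCollapseLoop ls (decide (PySem.Str.strip prev = "")) =
      (((prev :: ls).zip ls).filter
        (fun pl => !(PySem.Str.strip pl.2 == "") || !(PySem.Str.strip pl.1 == ""))).map Prod.snd := by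
  induction ls generalizing prev with
  | nil => simp [pvCollapseLoop]
  | cons l rest ih =>
    by_cases hl : PySem.Str.strip l = "" <;> by_cases hp : PySem.Str.strip prev = "" <;>
      simp [pvCollapseLoop, hl, hp, ← ih l]

theorem dedupe_eq (ls : List String) : pvCollapseLoop ls false = pvDedupeBlanks ls := by
  cases ls with
  | nil => simp [pvCollapseLoop, pvDedupeBlanks]
  | cons l rest =>
    by_cases hl : PySem.Str.strip l = "" <;>
      simp [pvCollapseLoop, pvDedupeBlanks, hl, ← dedupe_zip rest l]

-- the two formatting pipelines agree
theorem format_eq (summary : String) : pvFormatB summary = pvFormatCompactSummary summary := by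
  unfold pvFormatB pvFormatCompactSummary pvCollapseBlankLines
  simp only [pvDropBlock_eq, pvBlockContent_eq, dedupe_eq]

-- right-recursive view of the split-on-separator loop: (first group, later groups)
def pvSplitP : List String → List String × List (List String)
  | [] => ([], [])
  | l :: rest =>
    let p := pvSplitP rest
    if l = "- Key timeline:" then ([], p.1 :: p.2) else (l :: p.1, p.2)

theorem foldl_split (ls : List String) (gs : List (List String)) (cur : List String) :
    (ls.foldl pvSplitStep (gs, cur)).1 ++ [(ls.foldl pvSplitStep (gs, cur)).2] =
      gs ++ ((cur ++ (pvSplitP ls).1) :: (pvSplitP ls).2) := by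
  induction ls generalizing gs cur with
  | nil => simp [pvSplitP]
  | cons l rest ih =>
    by_cases hl : l = "- Key timeline:" <;>
      simp [pvSplitStep, pvSplitP, hl, List.foldl_cons, ih]

theorem flatten_splitP (ls : List String) :
    (pvSplitP ls).1 ++ (pvSplitP ls).2.flatten =
      ls.filter (fun l => !(l == "- Key timeline:")) := by
  induction ls with
  | nil => simp [pvSplitP]
  | cons l rest ih =>
    by_cases hl : l = "- Key timeline:" <;> simp [pvSplitP, hl, ih]

-- once the flag is set, A collects the nonblank run among non-marker lines
theorem aloop_true (ls : List String) :
    pvALoop ls true =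
      ((ls.map PySem.Str.rstrip).filter (fun l => !(l == "- Key timeline:"))).takeWhile
        (fun l => !(l == "")) := by
  induction ls with
  | nil => simp [pvALoop]
  | cons l rest ih =>
    by_cases hm : PySem.Str.rstrip l = "- Key timeline:"
    · simp [pvALoop, hm, ih]
    · by_cases hb : PySem.Str.rstrip l = ""
      · simp [pvALoop, hb]
      · simp [pvALoop, hm, hb, ih]

-- before the flag is set, A computes the non-blank prefix of the flattened later groups
theorem aloop_false (ls : List String) :
    pvALoop ls false =
      ((pvSplitP (ls.map PySem.Str.rstrip)).2.flatten).takeWhile (fun l => !(l == "")) := by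
  induction ls with
  | nil => simp [pvALoop, pvSplitP]
  | cons l rest ih =>
    by_cases hm : PySem.Str.rstrip l = "- Key timeline:"
    · rw [show pvALoop (l :: rest) false = pvALoop rest true by simp [pvALoop, hm]]
      rw [aloop_true]
      simp [pvSplitP, hm, flatten_splitP]
    · rw [show pvALoop (l :: rest) false = pvALoop rest false by simp [pvALoop, hm]]
      rw [ih]
      simp [pvSplitP, hm]

-- ===== VERDICT (by name: the statement is the Claim_ definition above) =====
theorem extract_summary_timeline_py_spec : Claim_equal_extract_summary_timeline_py := by
  intro summary _
  show extract_summary_timeline_py summary = extract_summary_timeline_py_alt summary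
  simp only [extract_summary_timeline_py, extract_summary_timeline_py_alt]
  rw [format_eq, aloop_false, foldl_split _ [] []]
  simp
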